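-- pv_equiv track=rewrite | github.com/goedel-gang/moire_draggable | serial_conversion/compress_ps.py | join_curlies
-- ===== SOURCE A (Python) =====
-- def join_curlies(components):
--     """
--     join a list of strings, with a little extra logic meaning that no
--     whitespace is used at the edges of functions
--     """
--     out = []
--     prec_space = False
--     for i in components:
--         if i == "}":
--             out.append(i)
--             prec_space = True
--         else:
--             if prec_space:
--                 out.append(" ")
--             out.append(i)
--             prec_space = i != "{"
--     return "".join(out)
-- ===== SOURCE B (Python) =====
-- def join_curlies(components):
--     """
--     join a list of strings, with a little extra logic meaning that no
--     whitespace is used at the edges of functions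
--     """
--     pieces = []
--     for i in range(len(components) - 1, 0, -1):
--         cur = components[i]
--         pieces.append(cur)
--         if components[i - 1] != "{" and cur != "}":
--             pieces.append(" ")
--     pieces.append(components[0] if components else "")
--     pieces.reverse()
--     return "".join(pieces)
-- ===== Notes on version B (the rewrite author's own statement) =====
-- stated objective: alternative
-- what changed: Replaces A's forward state-machine (carried prec_space flag) with a back-to-front construction: an index loop from the last element down to 1 that appends token then optional separator decided from the adjacent pair, followed by a reverse and join.
import Mathlib
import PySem

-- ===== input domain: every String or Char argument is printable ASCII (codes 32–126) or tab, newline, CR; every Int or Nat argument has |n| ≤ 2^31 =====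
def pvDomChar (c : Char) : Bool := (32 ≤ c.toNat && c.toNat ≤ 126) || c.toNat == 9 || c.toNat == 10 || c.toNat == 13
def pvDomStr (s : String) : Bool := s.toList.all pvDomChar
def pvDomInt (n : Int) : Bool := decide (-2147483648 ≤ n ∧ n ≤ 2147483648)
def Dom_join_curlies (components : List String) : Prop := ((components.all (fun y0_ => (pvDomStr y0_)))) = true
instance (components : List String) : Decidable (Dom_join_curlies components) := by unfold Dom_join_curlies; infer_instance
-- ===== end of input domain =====

-- B replaces A's forward state-machine (prec_space flag) with a back-to-front construction:
-- a countdown index loop appending token then optional separator, followed by reverse and join.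

-- ===== PORT A =====
-- literal transliteration of A's loop: state (out, prec_space), same branch order; "".join → PySem.Str.join ""
def join_curlies (components : List String) : String :=
  let st := components.foldl
    (fun (st : List String × Bool) i =>
      if i == "}" then (st.1 ++ [i], true)
      else (((if st.2 then st.1 ++ [" "] else st.1) ++ [i]), i != "{"))
    ([], false)
  PySem.Str.join "" st.1

-- ===== PORT B =====
-- transliteration of Source B: countdown range loop, then append first token, reverse, join.
-- components[i] / components[i-1] → pyGetD with default "" — exact here, every index drawn
-- from range(len-1, 0, -1) (and its predecessor) is in bounds.
def join_curlies_alt (components : List String) : String :=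
  let pieces :=
    (PySem.List.pyRange ((components.length : Int) - 1) 0 (-1)).foldl
      (fun (pieces : List String) i =>
        let cur := PySem.List.pyGetD components i ""
        let pieces := pieces ++ [cur]
        if PySem.List.pyGetD components (i - 1) "" != "{" && cur != "}" then
          pieces ++ [" "]
        else pieces)
      []
  PySem.Str.join ""
    ((pieces ++ [if components.isEmpty then "" else components.headD ""]).reverse)

-- ===== PRECONDITION & SPEC =====
def Spec_join_curlies (components : List String) (out : String) : Prop := out = join_curlies_alt components
instance (components : List String) (out : String) : Decidable (Spec_join_curlies components out) := by unfold Spec_join_curlies; infer_instance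

-- ===== CLAIM (what is proved, stated in full; the proofs are below) =====
def Claim_equal_join_curlies : Prop := ∀ (components : List String), Dom_join_curlies components → Spec_join_curlies components (join_curlies components)

-- ===== LEMMAS AND PROOFS =====

-- Chars.join with empty separator is list flattening
lemma pvJoinFlat (a : List (List Char)) : PySem.Chars.join [] a = a.flatten := by
  induction a with
  | nil => exact PySem.Chars.join_nil []
  | cons x a ih =>
    cases a with
    | nil => rw [PySem.Chars.join_singleton]; simp
    | cons z a => rw [PySem.Chars.join_cons_cons]; simp_all

lemma pvJ_snoc (out : List String) (s : String) :
    PySem.Str.join "" (out ++ [s]) = PySem.Str.join "" out ++ s := by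
  simp [PySem.Str.join, pvJoinFlat]

lemma pvJ_cons (s : String) (out : List String) :
    PySem.Str.join "" (s :: out) = s ++ PySem.Str.join "" out := by
  simp [PySem.Str.join, pvJoinFlat]

lemma pvJ_append (a b : List String) :
    PySem.Str.join "" (a ++ b) = PySem.Str.join "" a ++ PySem.Str.join "" b := by
  simp [PySem.Str.join, pvJoinFlat]

-- A's loop body, named for the proof
def pvStep : List String × Bool → String → List String × Bool :=
  fun st i =>
    if i == "}" then (st.1 ++ [i], true)
    else (((if st.2 then st.1 ++ [" "] else st.1) ++ [i]), i != "{")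

-- the common normal form: the joined tail after a previous token p
def pvTail : String → List String → String
  | _, [] => ""
  | p, c :: rest => ((if p == "{" || c == "}" then "" else " ") ++ c) ++ pvTail c rest

lemma pvTail_nil (p : String) : pvTail p [] = "" := rfl

lemma pvTail_cons (p c : String) (rest : List String) :
    pvTail p (c :: rest)
      = ((if p == "{" || c == "}" then "" else " ") ++ c) ++ pvTail c rest := rfl

-- ===== A side =====
-- loop invariant: A's fold from state (out, p ≠ "{") produces join out ++ pvTail p rest
lemma pvKey : ∀ (rest : List String) (out : List String) (p : String),
    PySem.Str.join "" (rest.foldl pvStep (out, p != "{")).1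
      = PySem.Str.join "" out ++ pvTail p rest := by
  intro rest
  induction rest with
  | nil => intro out p; simp [pvTail_nil]
  | cons c rest' ih =>
    intro out p
    rw [List.foldl_cons, pvTail_cons]
    by_cases hc : c = "}"
    · subst hc
      have hstep : pvStep (out, p != "{") "}" = (out ++ ["}"], ("}" != "{")) := by
        simp [pvStep]
      rw [hstep, ih, pvJ_snoc]
      simp [String.append_assoc]
    · by_cases hp : p = "{"
      · subst hp
        have hstep : pvStep (out, "{" != "{") c = (out ++ [c], c != "{") := by
          simp [pvStep, hc]
        rw [hstep, ih, pvJ_snoc]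
        simp [String.append_assoc]
      · have hstep : pvStep (out, p != "{") c = ((out ++ [" "]) ++ [c], c != "{") := by
          simp [pvStep, hc, hp]
        rw [hstep, ih, pvJ_snoc, pvJ_snoc]
        simp [hc, hp, String.append_assoc]

lemma pvAmain (c0 : String) (rest : List String) :
    join_curlies (c0 :: rest) = c0 ++ pvTail c0 rest := by
  show PySem.Str.join "" ((c0 :: rest).foldl pvStep ([], false)).1 = _
  have hfirst : pvStep ([], false) c0 = ([c0], c0 != "{") := by
    by_cases hc : c0 = "}"
    · subst hc; simp [pvStep]
    · simp [pvStep, hc]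
  rw [List.foldl_cons, hfirst, pvKey rest [c0] c0, pvJ_cons]
  rw [show PySem.Str.join "" ([] : List String) = "" from rfl]
  simp [String.append_empty]

-- ===== B side =====
-- one block of B's loop body at index i: the token, then the optional separator
def pvBlock (cs : List String) (i : Int) : List String :=
  if PySem.List.pyGetD cs (i - 1) "" != "{" && PySem.List.pyGetD cs i "" != "}" then
    [PySem.List.pyGetD cs i "", " "]
  else [PySem.List.pyGetD cs i ""]

-- the same block read off an adjacent pair, already reversed
def pvPBlock (pc : String × String) : List String :=
  if pc.1 != "{" && pc.2 != "}" then [" ", pc.2] else [pc.2]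

lemma pvBodyEq (cs : List String) :
    (fun (pieces : List String) (i : Int) =>
        let cur := PySem.List.pyGetD cs i ""
        let pieces := pieces ++ [cur]
        if PySem.List.pyGetD cs (i - 1) "" != "{" && cur != "}" then
          pieces ++ [" "]
        else pieces)
      = fun pieces i => pieces ++ pvBlock cs i := by
  funext p i
  simp only [pvBlock]
  split <;> simp

lemma pvFlatMapRev {α β : Type} (L : List α) (f : α → List β) :
    (L.reverse.flatMap f).reverse = L.flatMap (fun i => (f i).reverse) := by
  induction L with
  | nil => rfl
  | cons a L ih => simp [List.flatMap_append, ih]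

lemma pvBlockRev (cs : List String) (k : ℕ) :
    (pvBlock cs (1 + (k : Int))).reverse
      = pvPBlock (cs.getD k "", cs.getD (k + 1) "") := by
  have h2 : (1 + (k : Int)) - 1 = ((k : ℕ) : Int) := by omega
  have h1 : (1 + (k : Int)) = ((k + 1 : ℕ) : Int) := by omega
  rw [pvBlock, h2, h1]
  simp only [PySem.List.pyGetD_natCast]
  unfold pvPBlock
  split <;> simp

lemma pvZipFlat : ∀ (rest : List String) (c0 : String),
    (List.range rest.length).flatMap
        (fun k => pvPBlock ((c0 :: rest).getD k "", (c0 :: rest).getD (k + 1) ""))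
      = ((c0 :: rest).zip rest).flatMap pvPBlock := by
  intro rest
  induction rest with
  | nil => intro c0; rfl
  | cons c1 r ih =>
    intro c0
    simp only [List.length_cons]
    rw [List.range_succ_eq_map]
    simp only [List.flatMap_cons, List.flatMap_map, List.getD_cons_succ, List.getD_cons_zero,
      Nat.succ_eq_add_one]
    rw [show (c0 :: c1 :: r).zip (c1 :: r) = (c0, c1) :: ((c1 :: r).zip r) from rfl,
      List.flatMap_cons, ← ih c1]
    rfl

lemma pvJoinPairs : ∀ (rest : List String) (c0 : String),
    PySem.Str.join "" (((c0 :: rest).zip rest).flatMap pvPBlock) = pvTail c0 rest := by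
  intro rest
  induction rest with
  | nil => intro c0; rfl
  | cons c1 r ih =>
    intro c0
    rw [show (c0 :: c1 :: r).zip (c1 :: r) = (c0, c1) :: ((c1 :: r).zip r) from rfl,
      List.flatMap_cons, pvJ_append, ih c1, pvTail_cons]
    by_cases h0 : c0 = "{" <;> by_cases h1 : c1 = "}" <;>
      simp [pvPBlock, h0, h1, pvJ_cons, String.append_assoc,
        show PySem.Str.join "" ([] : List String) = "" from rfl]

lemma pvBmain (c0 : String) (rest : List String) :
    join_curlies_alt (c0 :: rest) = c0 ++ pvTail c0 rest := by
  show PySem.Str.join ""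
      ((((PySem.List.pyRange (((c0 :: rest).length : Int) - 1) 0 (-1)).foldl
          (fun (pieces : List String) (i : Int) =>
            let cur := PySem.List.pyGetD (c0 :: rest) i ""
            let pieces := pieces ++ [cur]
            if PySem.List.pyGetD (c0 :: rest) (i - 1) "" != "{" && cur != "}" then
              pieces ++ [" "]
            else pieces)
          []) ++ [if (c0 :: rest).isEmpty then "" else (c0 :: rest).headD ""]).reverse) = _
  rw [pvBodyEq (c0 :: rest), PySem.List.foldl_append_eq_flatMap]
  have hr : PySem.List.pyRange (((c0 :: rest).length : Int) - 1) 0 (-1)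
      = (PySem.List.pyRange 1 ((c0 :: rest).length : Int) 1).reverse := by
    rw [PySem.List.pyRange_neg_one_eq_reverse]; norm_num
  rw [hr]
  simp only [List.nil_append, List.isEmpty_cons, List.headD_cons, Bool.false_eq_true,
    if_false, List.reverse_append, List.reverse_cons, List.reverse_nil, List.nil_append]
  rw [List.singleton_append, pvFlatMapRev, pvJ_cons]
  have hlen : (((c0 :: rest).length : Int) - 1).toNat = rest.length := by
    simp [List.length_cons]
  rw [PySem.List.pyRange_one, List.flatMap_map, hlen]
  rw [show (fun (a : ℕ) => (pvBlock (c0 :: rest) (1 + (a : Int))).reverse)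
        = (fun (a : ℕ) => pvPBlock ((c0 :: rest).getD a "", (c0 :: rest).getD (a + 1) ""))
      from funext (fun k => pvBlockRev (c0 :: rest) k)]
  rw [pvZipFlat rest c0, pvJoinPairs rest c0]

-- ===== VERDICT (by name: the statement is the Claim_ definition above) =====
theorem join_curlies_spec : Claim_equal_join_curlies := by
  intro components _
  unfold Spec_join_curlies
  cases components with
  | nil => rfl
  | cons c0 rest => rw [pvAmain, pvBmain]
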